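-- pv_equiv track=rewrite | github.com/ptreezh/stigmergy-CLI-Multi-Agents | .agent/skills/field-expert/modules/habitus_analysis.py | analyze_embodied_knowledge
-- ===== SOURCE A (Python) =====
-- from typing import Dict, List, Any
--
-- def analyze_embodied_knowledge(actors: List[Dict[str, Any]]) -> Dict[str, Any]:
--     """
--     分析具身体现的知识
--
--     Args:
--         actors: 行动者列表
--
--     Returns:
--         具身体现知识分析结果
--     """
--     embodied_knowledge_analysis = {
--         "tacit_knowledge": [],
--         "practical_mastery": [],
--         "intuitive_understanding": [],
--         "bodily_techniques": [],
--         "non_verbal_aspects": []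
--     }
--
--     for actor in actors:
--         if 'embodied_knowledge' in actor:
--             knowledge = actor['embodied_knowledge']
--             embodied_knowledge_analysis["tacit_knowledge"].extend(knowledge.get('tacit', []))
--             embodied_knowledge_analysis["practical_mastery"].extend(knowledge.get('practical_mastery', []))
--             embodied_knowledge_analysis["intuitive_understanding"].extend(knowledge.get('intuitive', []))
--             embodied_knowledge_analysis["bodily_techniques"].extend(knowledge.get('bodily_techniques', []))
--             embodied_knowledge_analysis["non_verbal_aspects"].extend(knowledge.get('non_verbal', []))
--
--     return embodied_knowledge_analysis
-- ===== SOURCE B (Python) =====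
-- # B: field-outer decomposition — a key-mapping table and one comprehension per output field.
-- FIELD_MAP = [
--     ("tacit_knowledge", "tacit"),
--     ("practical_mastery", "practical_mastery"),
--     ("intuitive_understanding", "intuitive"),
--     ("bodily_techniques", "bodily_techniques"),
--     ("non_verbal_aspects", "non_verbal"),
-- ]
--
-- def analyze_embodied_knowledge(actors):
--     return {
--         out_key: [item
--                   for actor in actors
--                   if 'embodied_knowledge' in actor
--                   for item in actor['embodied_knowledge'].get(in_key, [])]
--         for out_key, in_key in FIELD_MAP
--     }
-- ===== Notes on version B (the rewrite author's own statement) =====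
-- stated objective: alternative
-- what changed: Replaced the actor-outer loop that mutates a five-list accumulator dict with a key-mapping table and a per-field comprehension: the result dict is built in one expression, each field gathered by its own pass over the actors.
import Mathlib
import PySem

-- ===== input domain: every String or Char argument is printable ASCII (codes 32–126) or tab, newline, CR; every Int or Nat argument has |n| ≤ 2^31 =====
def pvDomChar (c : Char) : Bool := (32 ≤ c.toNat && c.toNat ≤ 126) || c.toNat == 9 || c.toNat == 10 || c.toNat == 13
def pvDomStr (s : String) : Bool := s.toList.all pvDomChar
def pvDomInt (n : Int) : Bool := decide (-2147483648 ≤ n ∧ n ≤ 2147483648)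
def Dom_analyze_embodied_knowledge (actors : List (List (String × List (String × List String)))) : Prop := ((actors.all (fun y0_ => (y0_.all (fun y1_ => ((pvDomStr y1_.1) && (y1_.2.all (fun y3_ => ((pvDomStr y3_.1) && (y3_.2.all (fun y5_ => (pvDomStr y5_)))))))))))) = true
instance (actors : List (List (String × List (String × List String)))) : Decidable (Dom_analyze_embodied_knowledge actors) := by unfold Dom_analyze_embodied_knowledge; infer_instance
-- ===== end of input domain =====

-- B builds the result by a key-mapping table and one gathering pass per output field,
-- instead of A's single actor-outer loop mutating a five-list accumulator dict (objective: alternative).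

-- ===== PORT A =====
-- one loop-body step of A: extend the five accumulator lists of the result dict
def pvAStep (d : PySem.Dict String (List String))
    (actor : List (String × List (String × List String))) :
    PySem.Dict String (List String) :=
  match (PySem.Dict.mk actor).get? "embodied_knowledge" with
  | none => d
  | some knowledge =>
    let k := PySem.Dict.mk knowledge
    let d := d.modify "tacit_knowledge" [] (· ++ k.getD "tacit" [])
    let d := d.modify "practical_mastery" [] (· ++ k.getD "practical_mastery" [])
    let d := d.modify "intuitive_understanding" [] (· ++ k.getD "intuitive" [])
    let d := d.modify "bodily_techniques" [] (· ++ k.getD "bodily_techniques" [])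
    d.modify "non_verbal_aspects" [] (· ++ k.getD "non_verbal" [])

def analyze_embodied_knowledge (actors : List (List (String × List (String × List String)))) : List (String × List String) :=
  (actors.foldl pvAStep
    (PySem.Dict.mk [("tacit_knowledge", []), ("practical_mastery", []),
      ("intuitive_understanding", []), ("bodily_techniques", []),
      ("non_verbal_aspects", [])])).items

-- ===== PORT B =====
-- the comprehension over actors for one input key
def pvGather (actors : List (List (String × List (String × List String)))) (inKey : String) : List String :=
  actors.flatMap (fun actor =>
    match (PySem.Dict.mk actor).get? "embodied_knowledge" with
    | none => []
    | some knowledge => (PySem.Dict.mk knowledge).getD inKey [])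

def pvFieldMap : List (String × String) :=
  [("tacit_knowledge", "tacit"), ("practical_mastery", "practical_mastery"),
   ("intuitive_understanding", "intuitive"), ("bodily_techniques", "bodily_techniques"),
   ("non_verbal_aspects", "non_verbal")]

def analyze_embodied_knowledge_alt (actors : List (List (String × List (String × List String)))) : List (String × List String) :=
  pvFieldMap.map (fun p => (p.1, pvGather actors p.2))

-- ===== PRECONDITION & SPEC =====
def Spec_analyze_embodied_knowledge (actors : List (List (String × List (String × List String)))) (out : List (String × List String)) : Prop := out = analyze_embodied_knowledge_alt actors
instance (actors : List (List (String × List (String × List String)))) (out : List (String × List String)) : Decidable (Spec_analyze_embodied_knowledge actors out) := by unfold Spec_analyze_embodied_knowledge; infer_instance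

-- ===== CLAIM (what is proved, stated in full; the proofs are below) =====
def Claim_equal_analyze_embodied_knowledge : Prop := ∀ (actors : List (List (String × List (String × List String)))), Dom_analyze_embodied_knowledge actors → Spec_analyze_embodied_knowledge actors (analyze_embodied_knowledge actors)

-- ===== LEMMAS AND PROOFS =====

-- one step of A on the five-key accumulator dict, when the actor has embodied knowledge
theorem pvAStep_some (a1 a2 a3 a4 a5 : List String)
    (actor : List (String × List (String × List String)))
    (knowledge : List (String × List String))
    (h : (PySem.Dict.mk actor).get? "embodied_knowledge" = some knowledge) :
    pvAStep (PySem.Dict.mk [("tacit_knowledge", a1), ("practical_mastery", a2),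
      ("intuitive_understanding", a3), ("bodily_techniques", a4),
      ("non_verbal_aspects", a5)]) actor =
    PySem.Dict.mk
      [("tacit_knowledge", a1 ++ (PySem.Dict.mk knowledge).getD "tacit" []),
       ("practical_mastery", a2 ++ (PySem.Dict.mk knowledge).getD "practical_mastery" []),
       ("intuitive_understanding", a3 ++ (PySem.Dict.mk knowledge).getD "intuitive" []),
       ("bodily_techniques", a4 ++ (PySem.Dict.mk knowledge).getD "bodily_techniques" []),
       ("non_verbal_aspects", a5 ++ (PySem.Dict.mk knowledge).getD "non_verbal" [])] := by
  simp only [pvAStep, h]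
  rfl

-- loop invariant: A's fold over actors started from the five-key dict with accumulators
-- a1..a5 yields exactly those keys with each accumulator extended by B's gather lists
theorem pvFold_invariant (actors : List (List (String × List (String × List String))))
    (a1 a2 a3 a4 a5 : List String) :
    (actors.foldl pvAStep
      (PySem.Dict.mk [("tacit_knowledge", a1), ("practical_mastery", a2),
        ("intuitive_understanding", a3), ("bodily_techniques", a4),
        ("non_verbal_aspects", a5)])).items =
    [("tacit_knowledge", a1 ++ pvGather actors "tacit"),
     ("practical_mastery", a2 ++ pvGather actors "practical_mastery"),
     ("intuitive_understanding", a3 ++ pvGather actors "intuitive"),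
     ("bodily_techniques", a4 ++ pvGather actors "bodily_techniques"),
     ("non_verbal_aspects", a5 ++ pvGather actors "non_verbal")] := by
  induction actors generalizing a1 a2 a3 a4 a5 with
  | nil => simp [pvGather]
  | cons actor rest ih =>
    simp only [List.foldl_cons]
    cases h : (PySem.Dict.mk actor).get? "embodied_knowledge" with
    | none =>
      simp only [pvAStep, h]
      simp only [pvGather, List.flatMap_cons, h]
      rw [ih]
      simp [pvGather]
    | some knowledge =>
      rw [pvAStep_some _ _ _ _ _ _ _ h, ih]
      simp [pvGather, h, List.append_assoc]

-- ===== VERDICT (by name: the statement is the Claim_ definition above) =====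
theorem analyze_embodied_knowledge_spec : Claim_equal_analyze_embodied_knowledge := by
  intro actors _
  unfold Spec_analyze_embodied_knowledge analyze_embodied_knowledge analyze_embodied_knowledge_alt pvFieldMap
  rw [pvFold_invariant]
  simp
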